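-- pv_equiv track=rewrite | github.com/IkerEtxeQ/QI3B_2025 | notebooks/Optimización/Sener/result_utils.py | detectar_fin_precalentamiento
-- ===== SOURCE A (Python) =====
-- def detectar_fin_precalentamiento(vector):
--     """
--     Detecta los cambios de True a False y pone True desde ese punto en adelante.
--
--     Parameters
--     ----------
--     vector : list[bool]
--         Vector booleano de entrada.
--
--     Returns
--     -------
--     list[bool]
--         Vector booleano con True a partir del primer cambio de True a False.
--     """
--     resultado = [False] * len(vector)
--     activar = False
--
--     for i in range(len(vector)):
--         if i > 0 and vector[i - 1] and not vector[i]: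
--             activar = True
--         if activar:
--             resultado[i] = True
--
--     return resultado
-- ===== SOURCE B (Python) =====
-- def detectar_fin_precalentamiento(vector):
--     """Find the first True->False transition index, then build the result as
--     a replicated block of falses followed by a replicated block of trues."""
--     idx = len(vector)
--     for i, (prev, cur) in enumerate(zip(vector, vector[1:])):
--         if prev and not cur:
--             idx = i + 1
--             break
--     return [False] * idx + [True] * (len(vector) - idx)
-- ===== Notes on version B (the rewrite author's own statement) =====
-- stated objective: alternative
-- what changed: Replaced the per-element flag-maintaining loop writing into a preallocated result with a find-the-pivot scan over adjacent pairs (with early break) followed by constructing the output as two replicated blocks, falses up to the pivot then trues.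
import Mathlib
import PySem

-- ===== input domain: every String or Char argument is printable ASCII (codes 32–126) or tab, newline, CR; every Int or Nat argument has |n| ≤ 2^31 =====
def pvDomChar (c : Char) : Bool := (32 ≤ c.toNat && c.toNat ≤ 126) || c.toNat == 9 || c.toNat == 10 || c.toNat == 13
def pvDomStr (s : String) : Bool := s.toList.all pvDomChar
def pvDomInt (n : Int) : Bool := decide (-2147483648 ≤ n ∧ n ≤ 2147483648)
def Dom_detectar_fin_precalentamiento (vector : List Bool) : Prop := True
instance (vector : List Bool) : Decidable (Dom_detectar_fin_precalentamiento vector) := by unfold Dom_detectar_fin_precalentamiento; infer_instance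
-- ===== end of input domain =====

-- B replaces A's per-element flag loop by a find-the-pivot scan plus two-block construction (a different decomposition of the same task).


-- ===== PORT A =====
-- for-loop over range(len(vector)) with state (activar, resultado); indices are always in range, so pyGetD is exact
def detectar_fin_precalentamiento (vector : List Bool) : List Bool :=
  ((PySem.List.pyRange 0 (vector.length : Int)).foldl
    (fun (st : Bool × List Bool) (i : Int) =>
      let activar := if i > 0 ∧ PySem.List.pyGetD vector (i - 1) false = true ∧ PySem.List.pyGetD vector i false = false then true else st.1
      let resultado := if activar = true then st.2.set i.toNat true else st.2
      (activar, resultado))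
    (false, List.replicate vector.length false)).2

-- ===== PORT B =====
-- the for-loop over enumerate(zip(vector, vector[1:])) with break, as the obvious structural recursion on adjacent pairs
def pivotAux : List Bool → Nat → Option Nat
  | a :: b :: rest, i => if a = true ∧ b = false then some (i + 1) else pivotAux (b :: rest) (i + 1)
  | _, _ => none

def detectar_fin_precalentamiento_alt (vector : List Bool) : List Bool :=
  let idx : Nat := (pivotAux vector 0).getD vector.length
  List.replicate idx false ++ List.replicate (vector.length - idx) true

-- ===== PRECONDITION & SPEC =====
def Spec_detectar_fin_precalentamiento (vector : List Bool) (out : List Bool) : Prop := out = detectar_fin_precalentamiento_alt vector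
instance (vector : List Bool) (out : List Bool) : Decidable (Spec_detectar_fin_precalentamiento vector out) := by unfold Spec_detectar_fin_precalentamiento; infer_instance

-- ===== CLAIM (what is proved, stated in full; the proofs are below) =====
def Claim_equal_detectar_fin_precalentamiento : Prop := ∀ (vector : List Bool), Dom_detectar_fin_precalentamiento vector → Spec_detectar_fin_precalentamiento vector (detectar_fin_precalentamiento vector)

-- ===== LEMMAS AND PROOFS =====

-- tr v m: the Python condition "m > 0 and vector[m-1] and not vector[m]" as a Bool
def pvTr (v : List Bool) (m : Nat) : Bool := decide (0 < m) && v.getD (m - 1) false && !(v.getD m false)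

-- characterization of pivotAux: none = no adjacent True-False pair; some = first such pair (offset by the accumulator)
theorem pivotAux_cases (xs : List Bool) (i : Nat) :
    (pivotAux xs i = none ∧ ∀ p, p + 1 < xs.length → ¬(xs.getD p false = true ∧ xs.getD (p + 1) false = false))
    ∨ (∃ p, pivotAux xs i = some (i + p + 1) ∧ p + 1 < xs.length ∧ xs.getD p false = true ∧ xs.getD (p + 1) false = false
        ∧ ∀ q < p, ¬(xs.getD q false = true ∧ xs.getD (q + 1) false = false)) := by
  induction xs generalizing i with
  | nil => left; exact ⟨rfl, by intro p hp; simp at hp⟩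
  | cons a l ih =>
    match l, ih with
    | [], _ => left; exact ⟨rfl, by intro p hp; simp at hp⟩
    | b :: rest, ih =>
      by_cases hab : a = true ∧ b = false
      · right
        refine ⟨0, ?_, ?_, ?_, ?_, ?_⟩
        · simp [pivotAux, hab]
        · simp
        · simpa using hab.1
        · simpa using hab.2
        · intro q hq; omega
      · rcases ih (i + 1) with ⟨hnone, hall⟩ | ⟨p, hsome, hlt, hp1, hp2, hmin⟩
        · left
          refine ⟨by simp [pivotAux, hab, hnone], ?_⟩
          intro p hp
          match p with
          | 0 => simpa using hab
          | p + 1 =>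
            have := hall p (by simpa using hp)
            simpa using this
        · right
          refine ⟨p + 1, ?_, by simpa using hlt, by simpa using hp1, by simpa using hp2, ?_⟩
          · have : pivotAux (a :: b :: rest) i = pivotAux (b :: rest) (i + 1) := by
              simp [pivotAux, hab]
            rw [this, hsome]; congr 1; omega
          · intro q hq
            match q with
            | 0 => simpa using hab
            | q + 1 =>
              have := hmin q (by omega)
              simpa using this

-- pvTr at m+1 is exactly the adjacent pair (m, m+1)
theorem pvTr_false_of_not (v : List Bool) (m : Nat)
    (h : ¬(v.getD m false = true ∧ v.getD (m + 1) false = false)) : pvTr v (m + 1) = false := by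
  simp only [pvTr, Nat.add_sub_cancel]
  cases h1 : v.getD m false
  · simp
  · cases h2 : v.getD (m + 1) false
    · exact absurd ⟨h1, h2⟩ h
    · simp

-- the pivot index: everything strictly below it has pvTr false, and if it is < length then pvTr holds there
theorem pivot_min (v : List Bool) (m : Nat) (hm : m < (pivotAux v 0).getD v.length) :
    pvTr v m = false := by
  rcases pivotAux_cases v 0 with ⟨hnone, hall⟩ | ⟨p, hsome, hlt, hp1, hp2, hmin⟩
  · rw [hnone, Option.getD_none] at hm
    match m with
    | 0 => simp [pvTr]
    | m + 1 => exact pvTr_false_of_not v m (hall m (by omega))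
  · rw [hsome, Option.getD_some] at hm
    match m with
    | 0 => simp [pvTr]
    | m + 1 => exact pvTr_false_of_not v m (hmin m (by omega))

theorem pivot_le_len (v : List Bool) : (pivotAux v 0).getD v.length ≤ v.length := by
  rcases pivotAux_cases v 0 with ⟨hnone, _⟩ | ⟨p, hsome, hlt, _, _, _⟩
  · simp [hnone]
  · simp [hsome]; omega

theorem pivot_hit (v : List Bool) (h : (pivotAux v 0).getD v.length < v.length) :
    pvTr v ((pivotAux v 0).getD v.length) = true := by
  rcases pivotAux_cases v 0 with ⟨hnone, _⟩ | ⟨p, hsome, hlt, hp1, hp2, _⟩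
  · simp [hnone] at h
  · rw [hsome, Option.getD_some]
    have he : 0 + p + 1 = p + 1 := by omega
    rw [he]
    simp only [pvTr, Nat.add_sub_cancel]
    rw [hp1, hp2]
    simp

-- B's element j is decide (idx ≤ j); it equals "some transition at index ≤ j"
theorem B_elem (v : List Bool) (j : Nat) (hj : j < v.length) :
    (List.range (j + 1)).any (pvTr v) = decide ((pivotAux v 0).getD v.length ≤ j) := by
  set idx := (pivotAux v 0).getD v.length with hidx
  by_cases h : idx ≤ j
  · have hlt : idx < v.length := by omega
    have := pivot_hit v hlt
    simp only [h, decide_true]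
    rw [List.any_eq_true]
    exact ⟨idx, by simp [List.mem_range]; omega, this⟩
  · simp only [h, decide_false]
    rw [List.any_eq_false]
    intro m hm
    simp only [List.mem_range] at hm
    simp [pivot_min v m (by omega)]

-- the loop condition at index k is exactly pvTr v k
theorem pvTr_cond (v : List Bool) (k : Nat) :
    ((k : Int) > 0 ∧ PySem.List.pyGetD v ((k : Int) - 1) false = true ∧ PySem.List.pyGetD v (k : Int) false = false)
    ↔ pvTr v k = true := by
  match k with
  | 0 => simp [pvTr]
  | k + 1 =>
    have h1 : ((k + 1 : Nat) : Int) - 1 = ((k : Nat) : Int) := by push_cast; ring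
    rw [h1, PySem.List.pyGetD_natCast, PySem.List.pyGetD_natCast]
    simp only [pvTr, Nat.add_sub_cancel]
    constructor
    · rintro ⟨-, h2, h3⟩
      rw [h2, h3]
      simp
    · intro h
      refine ⟨by exact_mod_cast Nat.succ_pos k, ?_, ?_⟩
      · cases h4 : v.getD k false
        · rw [h4] at h; simp at h
        · rfl
      · cases h5 : v.getD (k + 1) false
        · rfl
        · rw [h5] at h; simp at h

-- one step of A's loop in closed form
theorem stepA_eq (v : List Bool) (st : Bool × List Bool) (k : Nat) :
    (fun (st : Bool × List Bool) (i : Int) =>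
      let activar := if i > 0 ∧ PySem.List.pyGetD v (i - 1) false = true ∧ PySem.List.pyGetD v i false = false then true else st.1
      let resultado := if activar = true then st.2.set i.toNat true else st.2
      (activar, resultado)) st ((k : Nat) : Int)
    = ((st.1 || pvTr v k), if (st.1 || pvTr v k) = true then st.2.set k true else st.2) := by
  by_cases hc : ((k : Int) > 0 ∧ PySem.List.pyGetD v ((k : Int) - 1) false = true ∧ PySem.List.pyGetD v (k : Int) false = false)
  · have htr : pvTr v k = true := (pvTr_cond v k).mp hc
    simp only [if_pos hc, htr, Bool.or_true, Int.toNat_natCast]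
  · have htr : pvTr v k = false := by
      cases h : pvTr v k
      · rfl
      · exact absurd ((pvTr_cond v k).mpr h) hc
    simp only [if_neg hc, htr, Bool.or_false, Int.toNat_natCast]

-- A's loop: state after k iterations
theorem loopA (v : List Bool) (k : Nat) (hk : k ≤ v.length) :
    (List.range k).foldl
      (fun (st : Bool × List Bool) (j : Nat) =>
        (fun (st : Bool × List Bool) (i : Int) =>
          let activar := if i > 0 ∧ PySem.List.pyGetD v (i - 1) false = true ∧ PySem.List.pyGetD v i false = false then true else st.1
          let resultado := if activar = true then st.2.set i.toNat true else st.2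
          (activar, resultado)) st ((j : Nat) : Int))
      (false, List.replicate v.length false)
    = ((List.range k).any (pvTr v),
       (List.range v.length).map (fun j => (List.range (j + 1)).any (pvTr v) && decide (j < k))) := by
  induction k with
  | zero =>
    simp only [List.range_zero, List.foldl_nil, List.any_nil, Prod.mk.injEq]
    refine ⟨by simp, ?_⟩
    apply List.ext_getElem (by simp)
    intro j h1 h2
    simp
  | succ k ih =>
    have hk' : k ≤ v.length := by omega
    rw [List.range_succ, List.foldl_append, ih hk', List.foldl_cons, List.foldl_nil, stepA_eq,
        ← List.range_succ]
    have hany : (List.range (k + 1)).any (pvTr v) = ((List.range k).any (pvTr v) || pvTr v k) := by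
      rw [List.range_succ, List.any_append]; simp
    show ((List.range k).any (pvTr v) || pvTr v k,
          if ((List.range k).any (pvTr v) || pvTr v k) = true
          then ((List.range v.length).map (fun j => (List.range (j + 1)).any (pvTr v) && decide (j < k))).set k true
          else (List.range v.length).map (fun j => (List.range (j + 1)).any (pvTr v) && decide (j < k))) = _
    rw [Prod.mk.injEq]
    refine ⟨hany.symm, ?_⟩
    by_cases ha : ((List.range k).any (pvTr v) || pvTr v k) = true
    · rw [if_pos ha]
      apply List.ext_getElem (by simp)
      intro j h1 h2
      simp only [List.length_set, List.length_map, List.length_range] at h1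
      rw [List.getElem_set]
      by_cases hjk : k = j
      · subst hjk
        have hKany : (List.range (k + 1)).any (pvTr v) = true := by rw [hany]; exact ha
        simp [hKany]
      · simp only [if_neg hjk, List.getElem_map, List.getElem_range]
        congr 1
        by_cases hjlt : j < k
        · simp [hjlt, (by omega : j < k + 1)]
        · have h3 : ¬ j < k + 1 := by omega
          simp [hjlt, h3]
    · rw [if_neg ha]
      have hfalse : (List.range (k + 1)).any (pvTr v) = false := by
        cases h : (List.range (k + 1)).any (pvTr v)
        · rfl
        · rw [hany] at h; exact absurd h (by simpa using ha)
      apply List.map_congr_left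
      intro j _
      by_cases hjk : j = k
      · subst hjk
        rw [hfalse]
        simp
      · congr 1
        by_cases hjlt : j < k
        · simp [hjlt, (by omega : j < k + 1)]
        · have h3 : ¬ j < k := hjlt
          have h4 : ¬ j < k + 1 := by omega
          simp [h3, h4]

-- ===== VERDICT (by name: the statement is the Claim_ definition above) =====
theorem detectar_fin_precalentamiento_spec : Claim_equal_detectar_fin_precalentamiento := by
  intro v _
  unfold Spec_detectar_fin_precalentamiento detectar_fin_precalentamiento detectar_fin_precalentamiento_alt
  rw [PySem.List.pyRange_zero_natCast, List.foldl_map, loopA v v.length (le_refl _)]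
  have hle := pivot_le_len v
  apply List.ext_getElem
  · simp
    omega
  · intro j h1 h2
    simp only [List.getElem_map, List.getElem_range, List.length_map, List.length_range] at h1 ⊢
    by_cases h : j < (pivotAux v 0).getD v.length
    · rw [List.getElem_append_left (by simpa using h)]
      have hnot : (List.range (j + 1)).any (pvTr v) = false := by
        rw [List.any_eq_false]
        intro m hm
        simp only [List.mem_range] at hm
        simp [pivot_min v m (by omega)]
      simp [hnot]
    · rw [List.getElem_append_right (by simp; omega)]
      have ht : (List.range (j + 1)).any (pvTr v) = true := by
        rw [B_elem v j h1]
        simp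
        omega
      simp [ht, h1]
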